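-- pv_equiv track=rewrite | github.com/anshikaCSE007/DSA | Arrays/numberOfTriplets/christmasTree.py | solve
-- ===== SOURCE A (Python) =====
-- def solve(A, B):
--     n = len(A);
--     ans = float("inf");
--     for i in range(n):
--
--         l = float("inf");
--         for j in range(i-1, -1, -1):
--             if(A[j] < A[i]):
--                 l = min(l, B[j]);
--
--
--         r = float("inf");
--         for j in range(i+1, n):
--             if(A[j] > A[i]):
--                 r = min(r, B[j]);
--
--
--         if(l != float("inf") and r != float("inf")):
--             ans = min(ans, (l+r+B[i]));
--
--
--     if(ans != float("inf")):
--         return ans;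
--
--     return -1;
-- ===== SOURCE B (Python) =====
-- def mn(o, v):
--     # min of an optional running value and an int (None = +inf)
--     return v if o is None or v < o else o
--
-- def omin(x, y):
--     # min of two optional values (None = +inf)
--     if x is None:
--         return y
--     if y is None:
--         return x
--     return min(x, y)
--
-- def bl(a, x):
--     # leftmost insertion point of x in sorted a (hand-written bisect_left)
--     lo, hi = 0, len(a)
--     while lo < hi:
--         mid = (lo + hi) // 2
--         if a[mid] < x:
--             lo = mid + 1
--         else:
--             hi = mid
--     return lo
--
-- def build(lo, hi):
--     # min-segment-tree over value-rank interval [lo, hi), all +inf (None)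
--     if hi <= lo + 1:
--         return [None]
--     mid = (lo + hi) // 2
--     return [None, build(lo, mid), build(mid, hi)]
--
-- def update(t, lo, hi, pos, v):
--     # point min-update at rank pos (functional)
--     if len(t) == 1:
--         return [mn(t[0], v)]
--     mid = (lo + hi) // 2
--     if pos < mid:
--         return [mn(t[0], v), update(t[1], lo, mid, pos, v), t[2]]
--     return [mn(t[0], v), t[1], update(t[2], mid, hi, pos, v)]
--
-- def query(t, lo, hi, l, r):
--     # min over ranks in [l, r)
--     if r <= lo or hi <= l:
--         return None
--     if l <= lo and hi <= r:
--         return t[0]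
--     if len(t) == 1:
--         return t[0]
--     mid = (lo + hi) // 2
--     return omin(query(t[1], lo, mid, l, r), query(t[2], mid, hi, l, r))
--
-- def solve(A, B):
--     # Offline O(n log n): compress A-values, sweep left-to-right with a min-segment
--     # tree over ranks to get L[i] = min B[j] (j < i, A[j] < A[i]), then right-to-left
--     # for R[i] = min B[k] (k > i, A[k] > A[i]), and combine.
--     n = len(A)
--     if n == 0:
--         return -1
--     vals = sorted(set(A))
--     m = len(vals)
--     L = []
--     t = build(0, m)
--     for i in range(n):
--         rk = bl(vals, A[i])
--         L.append(query(t, 0, m, 0, rk))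
--         t = update(t, 0, m, rk, B[i])
--     R = [None] * n
--     t = build(0, m)
--     for i in range(n - 1, -1, -1):
--         rk = bl(vals, A[i])
--         R[i] = query(t, 0, m, rk + 1, m)
--         t = update(t, 0, m, rk, B[i])
--     best = None
--     for i in range(n):
--         if L[i] is not None and R[i] is not None:
--             s = L[i] + R[i] + B[i]
--             if best is None or s < best:
--                 best = s
--     return -1 if best is None else best
-- ===== Notes on version B (the rewrite author's own statement) =====
-- stated objective: faster
-- what changed: Replaces A's per-center quadratic scans by an offline sweep: coordinate-compress the A values (sorted set + hand-written binary search) and use a functional min-segment tree over value ranks, queried for the prefix of smaller ranks on a left-to-right pass (L) and the suffix of larger ranks on a right-to-left pass (R), then combine linearly.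
-- outside the precondition, e.g. on solve([8, 5, 3], []): A returns -1, B raises IndexError
import Mathlib
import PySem

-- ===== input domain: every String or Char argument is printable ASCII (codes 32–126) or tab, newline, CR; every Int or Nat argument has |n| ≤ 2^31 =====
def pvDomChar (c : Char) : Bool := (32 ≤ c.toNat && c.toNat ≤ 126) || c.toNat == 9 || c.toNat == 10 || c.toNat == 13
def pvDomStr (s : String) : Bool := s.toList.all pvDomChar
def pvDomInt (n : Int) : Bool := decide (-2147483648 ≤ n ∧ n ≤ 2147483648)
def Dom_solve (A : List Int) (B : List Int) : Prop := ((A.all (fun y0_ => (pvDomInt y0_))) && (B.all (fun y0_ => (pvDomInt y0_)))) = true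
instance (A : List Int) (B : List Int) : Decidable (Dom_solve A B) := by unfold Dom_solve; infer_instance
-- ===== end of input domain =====

-- B replaces A's quadratic per-center scans by coordinate compression (sorted set +
-- hand-written binary search) and a functional min-segment tree over value ranks,
-- swept once left-to-right (L) and once right-to-left (R); measured asymptotically faster.

-- ===== PORT A =====
-- float("inf") is represented by `none`; all candidate values are ints, so
-- min with the running value is `ominA`, and `l != float("inf")` is `isSome`.
def ominA (o : Option Int) (x : Int) : Option Int :=
  some (match o with | none => x | some m => min m x)

def solve (A : List Int) (B : List Int) : Int :=
  let n : Int := A.length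
  let ans :=
    (PySem.List.pyRange 0 n 1).foldl (fun ans i =>
      let l := (PySem.List.pyRange (i-1) (-1) (-1)).foldl (fun l j =>
        if PySem.List.pyGetD A j 0 < PySem.List.pyGetD A i 0 then
          ominA l (PySem.List.pyGetD B j 0)
        else l) none
      let r := (PySem.List.pyRange (i+1) n 1).foldl (fun r j =>
        if PySem.List.pyGetD A j 0 > PySem.List.pyGetD A i 0 then
          ominA r (PySem.List.pyGetD B j 0)
        else r) none
      match l, r with
      | some lv, some rv => ominA ans (lv + rv + PySem.List.pyGetD B i 0)
      | _, _ => ans) none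
  match ans with
  | some v => v
  | none => -1

-- ===== PORT B =====
-- `None` in Python B is `none`; `mn`/`omin` are B's helpers transcribed.
def mnB (o : Option Int) (v : Int) : Option Int :=
  match o with
  | none => some v
  | some m => if v < m then some v else some m

def ominB : Option Int → Option Int → Option Int
  | none, y => y
  | some a, none => some a
  | some a, some b => some (min a b)

-- B's hand-written bisect_left loop (a[mid] is in range whenever hi ≤ len a, as at every call).
def bl (a : List Int) (x : Int) (lo hi : Nat) : Nat :=
  if lo < hi then
    let mid := (lo + hi) / 2
    if a.getD mid 0 < x then bl a x (mid + 1) hi else bl a x lo mid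
  else lo
termination_by hi - lo
decreasing_by all_goals omega

-- B's nested-list tree [v] / [v, left, right] as an inductive with the same two shapes.
inductive Seg where
  | leaf : Option Int → Seg
  | node : Option Int → Seg → Seg → Seg

def buildT (lo hi : Nat) : Seg :=
  if hi ≤ lo + 1 then .leaf none
  else .node none (buildT lo ((lo + hi) / 2)) (buildT ((lo + hi) / 2) hi)
termination_by hi - lo
decreasing_by all_goals omega

def updT : Seg → Nat → Nat → Nat → Int → Seg
  | .leaf m, _, _, _, v => .leaf (mnB m v)
  | .node m a b, lo, hi, pos, v =>
    if pos < (lo + hi) / 2 then .node (mnB m v) (updT a lo ((lo + hi) / 2) pos v) b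
    else .node (mnB m v) a (updT b ((lo + hi) / 2) hi pos v)

-- In Python's query the full-cover branch and the len==1 fallback both return t[0],
-- so the leaf case collapses to "disjoint → None, else t[0]".
def qryT : Seg → Nat → Nat → Nat → Nat → Option Int
  | .leaf m, lo, hi, l, r =>
    if r ≤ lo ∨ hi ≤ l then none else m
  | .node m a b, lo, hi, l, r =>
    if r ≤ lo ∨ hi ≤ l then none
    else if l ≤ lo ∧ hi ≤ r then m
    else ominB (qryT a lo ((lo + hi) / 2) l r) (qryT b ((lo + hi) / 2) hi l r)

-- `R[i] = …` filling back-to-front over i = n-1 … 0 is built by consing; `L.append` by `++ [·]`.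
def solve_alt (A : List Int) (B : List Int) : Int :=
  let n := A.length
  if n = 0 then -1
  else
    let vals := PySem.List.sorted (PySem.Set.ofList A) (fun x => x) false
    let m := vals.length
    let Lst := (List.range n).foldl
      (fun (p : Seg × List (Option Int)) i =>
        let rk := bl vals (A.getD i 0) 0 m
        (updT p.1 0 m rk (B.getD i 0), p.2 ++ [qryT p.1 0 m 0 rk]))
      (buildT 0 m, [])
    let Rst := (List.range n).reverse.foldl
      (fun (p : Seg × List (Option Int)) i =>
        let rk := bl vals (A.getD i 0) 0 m
        (updT p.1 0 m rk (B.getD i 0), qryT p.1 0 m (rk + 1) m :: p.2))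
      (buildT 0 m, [])
    let best := (List.range n).foldl
      (fun best i =>
        let lo := Lst.2.getD i none
        let ro := Rst.2.getD i none
        if lo.isSome ∧ ro.isSome then mnB best (lo.getD 0 + ro.getD 0 + B.getD i 0)
        else best)
      none
    best.getD (-1)

-- ===== PRECONDITION & SPEC =====
-- Pre_ excludes inputs with len(B) < len(A): there Python A raises IndexError as soon as any
-- comparison A[j]<A[i] (or >) fires, and only returns -1 when no pair ever fires, an accident
-- of its lazy indexing that B (which reads B[i] for every i) does not reproduce.
def Pre_solve (A : List Int) (B : List Int) : Prop := A.length ≤ B.length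
instance (A : List Int) (B : List Int) : Decidable (Pre_solve A B) := by unfold Pre_solve; infer_instance
def pvWitness_solve : List Int × List Int := ([1, 2, 3], [4, 5, 6])

def Spec_solve (A : List Int) (B : List Int) (out : Int) : Prop := out = solve_alt A B
instance (A : List Int) (B : List Int) (out : Int) : Decidable (Spec_solve A B out) := by unfold Spec_solve; infer_instance

-- ===== CLAIM (what is proved, stated in full; the proofs are below) =====
def Claim_equal_solve : Prop := ∀ (A : List Int) (B : List Int), Dom_solve A B → Pre_solve A B → Spec_solve A B (solve A B)

-- ===== LEMMAS AND PROOFS =====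

-- proof-side abbreviations (A side, from the characterization of A's two scans)
def g (xs : List Int) (i : Nat) : Int := xs.getD i 0
def mfold (o : Option Int) (xs : List Int) : Option Int := xs.foldl ominA o
def Lspec (A B : List Int) (i : Nat) : Option Int :=
  mfold none (((List.range i).filter (fun j => g A j < g A i)).map (g B))
def Rspec (A B : List Int) (n i : Nat) : Option Int :=
  mfold none (((List.range' (i+1) (n - (i+1))).filter (fun j => g A i < g A j)).map (g B))

lemma ominA_rcomm (o : Option Int) (x y : Int) :
    ominA (ominA o x) y = ominA (ominA o y) x := by
  cases o <;> simp [ominA, min_comm, min_left_comm]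

lemma foldl_if_ominA {α : Type} (xs : List α) (p : α → Prop) [DecidablePred p]
    (v : α → Int) (o : Option Int) :
    xs.foldl (fun o j => if p j then ominA o (v j) else o) o
      = mfold o ((xs.filter (fun j => decide (p j))).map v) := by
  induction xs generalizing o with
  | nil => rfl
  | cons a xs ih => by_cases h : p a <;> simp [mfold, List.foldl, h, ih, mfold]

lemma pyRange_natCast_range' (s n : Nat) :
    PySem.List.pyRange (s : Int) (n : Int) 1 = (List.range' s (n - s)).map (fun k : Nat => (k : Int)) := by
  rw [PySem.List.pyRange_one]
  have h : ((n : Int) - s).toNat = n - s := by omega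
  simp only [List.range'_eq_map_range, List.map_map, h]
  apply List.map_congr_left
  intro k _
  simp

def combineFold (A B : List Int) (n : Nat) : Option Int :=
  (List.range n).foldl (fun ans i =>
    match Lspec A B i, Rspec A B n i with
    | some lv, some rv => ominA ans (lv + rv + g B i)
    | _, _ => ans) none

lemma lterm_char (A B : List Int) (i : Nat) :
    (PySem.List.pyRange ((i : Int) - 1) (-1) (-1)).foldl (fun l j =>
        if PySem.List.pyGetD A j 0 < PySem.List.pyGetD A (i : Int) 0 then
          ominA l (PySem.List.pyGetD B j 0)
        else l) none = Lspec A B i := by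
  rw [PySem.List.pyRange_neg_one_eq_reverse]
  rw [show ((-1 : Int) + 1) = 0 from by norm_num, show ((i : Int) - 1 + 1) = (i : Int) from by ring]
  rw [(List.reverse_perm _).foldl_eq (rcomm := ⟨by
    intro b x y
    split_ifs <;> first | rfl | apply ominA_rcomm⟩)]
  rw [PySem.List.pyRange_zero_nat, List.foldl_map]
  simp only [PySem.List.pyGetD_natCast]
  rw [foldl_if_ominA (List.range i) (fun j => A.getD j 0 < A.getD i 0) (fun j => B.getD j 0)]
  rfl

lemma rterm_char (A B : List Int) (i : Nat) :
    (PySem.List.pyRange ((i : Int) + 1) (A.length : Int) 1).foldl (fun r j =>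
        if PySem.List.pyGetD A j 0 > PySem.List.pyGetD A (i : Int) 0 then
          ominA r (PySem.List.pyGetD B j 0)
        else r) none = Rspec A B A.length i := by
  rw [show ((i : Int) + 1) = ((i + 1 : Nat) : Int) from by push_cast; ring]
  rw [pyRange_natCast_range', List.foldl_map]
  simp only [PySem.List.pyGetD_natCast]
  rw [foldl_if_ominA (List.range' (i+1) (A.length - (i+1))) (fun j => A.getD j 0 > A.getD i 0)
    (fun j => B.getD j 0)]
  rfl

lemma solve_char (A B : List Int) :
    solve A B = match combineFold A B A.length with | some v => v | none => -1 := by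
  have hbody : solve A B =
      match (PySem.List.pyRange 0 (A.length : Int) 1).foldl (fun ans i =>
        match (PySem.List.pyRange (i-1) (-1) (-1)).foldl (fun l j =>
            if PySem.List.pyGetD A j 0 < PySem.List.pyGetD A i 0 then
              ominA l (PySem.List.pyGetD B j 0)
            else l) none,
          (PySem.List.pyRange (i+1) (A.length : Int) 1).foldl (fun r j =>
            if PySem.List.pyGetD A j 0 > PySem.List.pyGetD A i 0 then
              ominA r (PySem.List.pyGetD B j 0)
            else r) none with
        | some lv, some rv => ominA ans (lv + rv + PySem.List.pyGetD B i 0)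
        | _, _ => ans) none with
      | some v => v
      | none => -1 := rfl
  rw [hbody]
  have hfold : (PySem.List.pyRange 0 (A.length : Int) 1).foldl (fun ans i =>
        match (PySem.List.pyRange (i-1) (-1) (-1)).foldl (fun l j =>
            if PySem.List.pyGetD A j 0 < PySem.List.pyGetD A i 0 then
              ominA l (PySem.List.pyGetD B j 0)
            else l) none,
          (PySem.List.pyRange (i+1) (A.length : Int) 1).foldl (fun r j =>
            if PySem.List.pyGetD A j 0 > PySem.List.pyGetD A i 0 then
              ominA r (PySem.List.pyGetD B j 0)
            else r) none with
        | some lv, some rv => ominA ans (lv + rv + PySem.List.pyGetD B i 0)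
        | _, _ => ans) none = combineFold A B A.length := by
    rw [PySem.List.pyRange_zero_nat, List.foldl_map]
    unfold combineFold
    apply List.foldl_ext
    intro acc i _
    rw [lterm_char A B i, rterm_char A B i]
    simp only [PySem.List.pyGetD_natCast]
    rfl
  rw [hfold]

-- ===== B-side machinery =====

lemma mnB_eq_ominA (o : Option Int) (v : Int) : mnB o v = ominA o v := by
  cases o with
  | none => rfl
  | some m =>
    simp only [mnB, ominA, min_def]
    split_ifs <;> first | rfl | (exfalso; omega)

lemma mnB_eq_ominB (o : Option Int) (v : Int) : mnB o v = ominB o (some v) := by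
  cases o with
  | none => rfl
  | some m =>
    simp only [mnB, ominB, min_def]
    split_ifs <;> first | rfl | (exfalso; omega)

lemma ominB_none_right (x : Option Int) : ominB x none = x := by cases x <;> rfl

lemma ominB_assoc (x y z : Option Int) : ominB (ominB x y) z = ominB x (ominB y z) := by
  cases x <;> cases y <;> cases z <;> simp [ominB, min_assoc]

-- the running minimum of f over ranks [lo, hi)
def rmin (f : Nat → Option Int) (lo hi : Nat) : Option Int :=
  (List.range' lo (hi - lo)).foldl (fun acc q => ominB acc (f q)) none

lemma foldl_ominB_start (f : Nat → Option Int) (l : List Nat) :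
    ∀ a, l.foldl (fun acc q => ominB acc (f q)) a
      = ominB a (l.foldl (fun acc q => ominB acc (f q)) none) := by
  induction l with
  | nil => intro a; exact (ominB_none_right a).symm
  | cons q l ih =>
    intro a
    simp only [List.foldl_cons]
    rw [ih (ominB a (f q)), ih (ominB none (f q)), ominB_assoc]
    rfl

lemma rmin_empty (f : Nat → Option Int) (lo hi : Nat) (h : hi ≤ lo) :
    rmin f lo hi = none := by
  simp [rmin, Nat.sub_eq_zero_of_le h]

lemma rmin_single (f : Nat → Option Int) (lo : Nat) : rmin f lo (lo + 1) = f lo := by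
  have e : lo + 1 - lo = 1 := by omega
  rw [rmin, e, List.range'_one]
  rfl

lemma rmin_split (f : Nat → Option Int) (lo mid hi : Nat) (h1 : lo ≤ mid) (h2 : mid ≤ hi) :
    rmin f lo hi = ominB (rmin f lo mid) (rmin f mid hi) := by
  have hr := @List.range'_append lo (mid - lo) (hi - mid) 1
  have e1 : lo + 1 * (mid - lo) = mid := by omega
  have e2 : (mid - lo) + (hi - mid) = hi - lo := by omega
  rw [e1, e2] at hr
  rw [rmin, ← hr, List.foldl_append, foldl_ominB_start]
  rfl

lemma rmin_congr (f f' : Nat → Option Int) (lo hi : Nat)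
    (h : ∀ q, lo ≤ q → q < hi → f q = f' q) : rmin f lo hi = rmin f' lo hi := by
  unfold rmin
  apply List.foldl_ext
  intro a q hq
  have := List.mem_range'_1.mp hq
  rw [h q this.1 (by omega)]

lemma rmin_const_none (lo hi : Nat) : rmin (fun _ => none) lo hi = none := by
  unfold rmin
  generalize List.range' lo (hi - lo) = l
  induction l with
  | nil => rfl
  | cons q l ih => simpa using ih

-- point min-update of the rank table
def fupd (f : Nat → Option Int) (p : Nat) (v : Int) : Nat → Option Int :=
  fun q => if q = p then mnB (f q) v else f q

lemma rmin_fupd_in (f : Nat → Option Int) (p : Nat) (v : Int) (lo hi : Nat)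
    (h1 : lo ≤ p) (h2 : p < hi) :
    rmin (fupd f p v) lo hi = ominB (rmin f lo hi) (some v) := by
  have e1 : rmin (fupd f p v) lo p = rmin f lo p :=
    rmin_congr _ _ _ _ (fun q _ hq => by simp [fupd, Nat.ne_of_lt hq])
  have e2 : rmin (fupd f p v) (p+1) hi = rmin f (p+1) hi :=
    rmin_congr _ _ _ _ (fun q hq _ => by simp [fupd, Nat.ne_of_gt hq])
  rw [rmin_split _ lo p hi h1 (by omega), rmin_split _ p (p+1) hi (by omega) (by omega),
      rmin_single, e1, e2,
      rmin_split f lo p hi h1 (by omega), rmin_split f p (p+1) hi (by omega) (by omega),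
      rmin_single]
  have hp : fupd f p v p = ominB (f p) (some v) := by simp [fupd, mnB_eq_ominB]
  rw [hp]
  cases rmin f lo p <;> cases f p <;> cases rmin f (p+1) hi <;>
    simp [ominB, min_comm, min_left_comm]

lemma rmin_fupd_out (f : Nat → Option Int) (p : Nat) (v : Int) (lo hi : Nat)
    (h : p < lo ∨ hi ≤ p) :
    rmin (fupd f p v) lo hi = rmin f lo hi :=
  rmin_congr _ _ _ _ (fun q hq hq' => by
    have : q ≠ p := by omega
    simp [fupd, this])

-- the segment-tree invariant: node values are range minima of the rank table f
def GoodT : Seg → Nat → Nat → (Nat → Option Int) → Prop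
  | .leaf m, lo, hi, f => hi = lo + 1 ∧ m = f lo
  | .node m a b, lo, hi, f =>
      lo + 1 < hi ∧ GoodT a lo ((lo + hi) / 2) f ∧ GoodT b ((lo + hi) / 2) hi f ∧
      m = rmin f lo hi

lemma GoodT_congr (t : Seg) : ∀ (lo hi : Nat) (f f' : Nat → Option Int),
    GoodT t lo hi f → (∀ q, lo ≤ q → q < hi → f q = f' q) → GoodT t lo hi f' := by
  induction t with
  | leaf m =>
    intro lo hi f f' hg h
    obtain ⟨h1, h2⟩ := hg
    exact ⟨h1, by rw [h2, h lo (le_refl _) (by omega)]⟩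
  | node m a b iha ihb =>
    intro lo hi f f' hg h
    obtain ⟨h1, h2, h3, h4⟩ := hg
    have hm : (lo + hi) / 2 ≤ hi := by omega
    have hm2 : lo ≤ (lo + hi) / 2 := by omega
    exact ⟨h1, iha _ _ _ _ h2 (fun q hq hq' => h q hq (by omega)),
      ihb _ _ _ _ h3 (fun q hq hq' => h q (by omega) hq'),
      by rw [h4]; exact rmin_congr _ _ _ _ h⟩

lemma build_good : ∀ (d lo hi : Nat), hi - lo = d → lo < hi →
    GoodT (buildT lo hi) lo hi (fun _ => none) := by
  intro d
  induction d using Nat.strong_induction_on with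
  | _ d ih =>
    intro lo hi hd hlt
    rw [buildT]
    by_cases h : hi ≤ lo + 1
    · rw [if_pos h]
      exact ⟨by omega, rfl⟩
    · rw [if_neg h]
      refine ⟨by omega, ?_, ?_, (rmin_const_none lo hi).symm⟩
      · exact ih ((lo + hi) / 2 - lo) (by omega) lo _ rfl (by omega)
      · exact ih (hi - (lo + hi) / 2) (by omega) _ hi rfl (by omega)

lemma upd_good (t : Seg) : ∀ (lo hi pos : Nat) (v : Int) (f : Nat → Option Int),
    GoodT t lo hi f → lo ≤ pos → pos < hi →
    GoodT (updT t lo hi pos v) lo hi (fupd f pos v) := by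
  induction t with
  | leaf m =>
    intro lo hi pos v f hg hp1 hp2
    obtain ⟨h1, h2⟩ := hg
    have hpl : pos = lo := by omega
    exact ⟨h1, by simp [fupd, hpl, h2]⟩
  | node m a b iha ihb =>
    intro lo hi pos v f hg hp1 hp2
    obtain ⟨h1, h2, h3, h4⟩ := hg
    have hmv : mnB m v = rmin (fupd f pos v) lo hi := by
      rw [h4, mnB_eq_ominB, rmin_fupd_in f pos v lo hi hp1 hp2]
    rw [updT]
    by_cases hc : pos < (lo + hi) / 2
    · rw [if_pos hc]
      refine ⟨h1, iha _ _ _ _ _ h2 hp1 hc, ?_, hmv⟩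
      exact GoodT_congr b _ _ _ _ h3 (fun q hq _ => by
        have : q ≠ pos := by omega
        simp [fupd, this])
    · rw [if_neg hc]
      refine ⟨h1, ?_, ihb _ _ _ _ _ h3 (by omega) hp2, hmv⟩
      exact GoodT_congr a _ _ _ _ h2 (fun q _ hq => by
        have : q ≠ pos := by omega
        simp [fupd, this])

lemma qry_good (t : Seg) (l r : Nat) : ∀ (lo hi : Nat) (f : Nat → Option Int),
    GoodT t lo hi f → qryT t lo hi l r = rmin f (max lo l) (min hi r) := by
  induction t with
  | leaf m =>
    intro lo hi f hg
    obtain ⟨h1, h2⟩ := hg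
    subst h1
    rw [qryT]
    by_cases hdisj : r ≤ lo ∨ lo + 1 ≤ l
    · rw [if_pos hdisj]
      exact (rmin_empty _ _ _ (by omega)).symm
    · rw [if_neg hdisj]
      have hmax : max lo l = lo := by omega
      have hmin : min (lo + 1) r = lo + 1 := by omega
      rw [hmax, hmin, rmin_single, h2]
  | node m a b iha ihb =>
    intro lo hi f hg
    obtain ⟨h1, h2, h3, h4⟩ := hg
    have hmid1 : lo < (lo + hi) / 2 := by omega
    have hmid2 : (lo + hi) / 2 < hi := by omega
    rw [qryT]
    by_cases hdisj : r ≤ lo ∨ hi ≤ l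
    · rw [if_pos hdisj]
      exact (rmin_empty _ _ _ (by omega)).symm
    · rw [if_neg hdisj]
      by_cases hcov : l ≤ lo ∧ hi ≤ r
      · rw [if_pos hcov]
        have hmax : max lo l = lo := by omega
        have hmin : min hi r = hi := by omega
        rw [hmax, hmin, h4]
      · rw [if_neg hcov]
        rw [iha _ _ _ h2, ihb _ _ _ h3]
        set mid := (lo + hi) / 2 with hmid
        by_cases hrm : r ≤ mid
        · have hr : rmin f (max mid l) (min hi r) = none :=
            rmin_empty _ _ _ (by omega)
          rw [hr, ominB_none_right]
          congr 1
          omega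
        · by_cases hlm : mid ≤ l
          · have hl : rmin f (max lo l) (min mid r) = none :=
              rmin_empty _ _ _ (by omega)
            rw [hl]
            have e1 : max mid l = max lo l := by omega
            rw [e1]
            rfl
          · have e1 : min mid r = mid := by omega
            have e2 : max mid l = mid := by omega
            rw [e1, e2]
            exact (rmin_split f _ mid _ (by omega) (by omega)).symm

-- rank-table after min-inserting (rk j, bv j) for j along js, and the grouped minimum
def fL (rk : Nat → Nat) (bv : Nat → Int) (js : List Nat) : Nat → Option Int :=
  js.foldl (fun f j => fupd f (rk j) (bv j)) (fun _ => none)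

def MB (xs : List Int) : Option Int := xs.foldl mnB none

lemma MB_eq_mfold (xs : List Int) : MB xs = mfold none xs := by
  unfold MB mfold
  apply List.foldl_ext
  intro a x _
  exact mnB_eq_ominA a x

lemma MB_append_singleton (xs : List Int) (v : Int) : MB (xs ++ [v]) = mnB (MB xs) v := by
  simp [MB, List.foldl_append]

lemma MB_reverse (xs : List Int) : MB xs.reverse = MB xs := by
  unfold MB
  exact (List.reverse_perm xs).foldl_eq (rcomm := ⟨by
    intro b x y
    simp only [mnB_eq_ominA]
    apply ominA_rcomm⟩) none

lemma regroup (rk : Nat → Nat) (bv : Nat → Int) (l r : Nat) : ∀ (js : List Nat),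
    rmin (fL rk bv js) l r
      = MB ((js.filter (fun j => decide (l ≤ rk j ∧ rk j < r))).map bv) := by
  intro js
  induction js using List.reverseRecOn with
  | nil => simp [fL, MB, rmin_const_none]
  | append_singleton js j ih =>
    have hstep : fL rk bv (js ++ [j]) = fupd (fL rk bv js) (rk j) (bv j) := by
      simp [fL, List.foldl_append]
    rw [hstep, List.filter_append, List.map_append]
    by_cases hc : l ≤ rk j ∧ rk j < r
    · rw [rmin_fupd_in _ _ _ _ _ hc.1 hc.2, ih]
      have : List.filter (fun j => decide (l ≤ rk j ∧ rk j < r)) [j] = [j] := by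
        simp [hc.1, hc.2]
      rw [this, List.map_cons, List.map_nil, MB_append_singleton, mnB_eq_ominB]
    · rw [rmin_fupd_out _ _ _ _ _ (by omega), ih]
      have : List.filter (fun j => decide (l ≤ rk j ∧ rk j < r)) [j] = [] := by
        simp only [List.filter_cons, List.filter_nil]
        rw [if_neg (by simpa using hc)]
      rw [this, List.map_nil, List.append_nil]


-- ===== binary search and ranks =====

lemma bl_unfold (a : List Int) (x : Int) (lo hi : Nat) :
    bl a x lo hi = if lo < hi then
        (if a.getD ((lo + hi) / 2) 0 < x then bl a x ((lo + hi) / 2 + 1) hi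
         else bl a x lo ((lo + hi) / 2))
      else lo := by
  conv_lhs => rw [bl]

lemma bl_spec (a : List Int) (x : Int)
    (hmono : ∀ i j : Nat, i < j → j < a.length → a.getD i 0 ≤ a.getD j 0) :
    ∀ (d lo hi : Nat), hi - lo = d → lo ≤ hi → hi ≤ a.length →
      lo ≤ bl a x lo hi ∧ bl a x lo hi ≤ hi ∧
      (∀ j, lo ≤ j → j < bl a x lo hi → a.getD j 0 < x) ∧
      (∀ j, bl a x lo hi ≤ j → j < hi → x ≤ a.getD j 0) := by
  intro d
  induction d using Nat.strong_induction_on with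
  | _ d ih =>
    intro lo hi hd hle hlen
    rw [bl_unfold]
    by_cases h : lo < hi
    · rw [if_pos h]
      by_cases hc : a.getD ((lo + hi) / 2) 0 < x
      · rw [if_pos hc]
        obtain ⟨h1, h2, h3, h4⟩ :=
          ih (hi - ((lo + hi) / 2 + 1)) (by omega) ((lo + hi) / 2 + 1) hi rfl (by omega) hlen
        refine ⟨by omega, h2, ?_, h4⟩
        intro j hj1 hj2
        by_cases hjm : (lo + hi) / 2 + 1 ≤ j
        · exact h3 j hjm hj2
        · have hj : j = (lo + hi) / 2 ∨ j < (lo + hi) / 2 := by omega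
          rcases hj with hj | hj
          · rw [hj]; exact hc
          · exact lt_of_le_of_lt (hmono j ((lo + hi) / 2) hj (by omega)) hc
      · rw [if_neg hc]
        obtain ⟨h1, h2, h3, h4⟩ :=
          ih ((lo + hi) / 2 - lo) (by omega) lo ((lo + hi) / 2) rfl (by omega) (by omega)
        refine ⟨h1, by omega, h3, ?_⟩
        intro j hj1 hj2
        by_cases hjm : j < (lo + hi) / 2
        · exact h4 j hj1 hjm
        · have hx : x ≤ a.getD ((lo + hi) / 2) 0 := le_of_not_gt hc
          have hj : j = (lo + hi) / 2 ∨ (lo + hi) / 2 < j := by omega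
          rcases hj with hj | hj
          · rw [hj]; exact hx
          · exact le_trans hx (hmono ((lo + hi) / 2) j hj (by omega))
    · rw [if_neg h]
      exact ⟨le_refl _, by omega, fun j hj1 hj2 => by omega, fun j hj1 hj2 => by omega⟩

-- sorted(set(A)) and the rank of A[i] in it
def svals (A : List Int) : List Int := PySem.List.sorted (PySem.Set.ofList A) (fun x => x) false

def rkF (A : List Int) (i : Nat) : Nat := bl (svals A) (A.getD i 0) 0 (svals A).length

lemma mem_svals (A : List Int) (x : Int) : x ∈ svals A ↔ x ∈ A := by
  unfold svals
  rw [PySem.List.mem_sorted]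
  exact PySem.Set.mem_ofList A x

lemma svals_getD_lt (A : List Int) {i j : Nat} (hij : i < j) (hj : j < (svals A).length) :
    (svals A).getD i 0 < (svals A).getD j 0 := by
  unfold svals at hj ⊢
  have hp := PySem.List.sorted_ofList_pairwise_lt A
  rw [List.pairwise_iff_getElem] at hp
  have h := hp i j (by omega) hj hij
  rw [List.getD_eq_getElem _ _ (by omega), List.getD_eq_getElem _ _ hj]
  exact h

lemma svals_getD_le (A : List Int) {i j : Nat} (hij : i ≤ j) (hj : j < (svals A).length) :
    (svals A).getD i 0 ≤ (svals A).getD j 0 := by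
  rcases Nat.lt_or_ge i j with h | h
  · exact le_of_lt (svals_getD_lt A h hj)
  · have : i = j := by omega
    rw [this]

lemma rkF_spec (A : List Int) (i : Nat) (hi : i < A.length) :
    rkF A i < (svals A).length ∧ (svals A).getD (rkF A i) 0 = A.getD i 0 := by
  unfold rkF
  have hx : A.getD i 0 ∈ svals A := (mem_svals A _).mpr (by
    rw [List.getD_eq_getElem _ _ hi]
    exact List.getElem_mem hi)
  obtain ⟨k, hk, hak⟩ := List.mem_iff_getElem.mp hx
  obtain ⟨h1, h2, h3, h4⟩ := bl_spec (svals A) (A.getD i 0)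
    (fun p q hpq hq => svals_getD_le A (le_of_lt hpq) hq)
    ((svals A).length - 0) 0 (svals A).length rfl (Nat.zero_le _) (le_refl _)
  have hgk : (svals A).getD k 0 = A.getD i 0 := by
    rw [List.getD_eq_getElem _ _ hk]; exact hak
  have hbk : bl (svals A) (A.getD i 0) 0 (svals A).length ≤ k := by
    by_contra hlt
    have := h3 k (Nat.zero_le _) (by omega)
    rw [hgk] at this
    exact lt_irrefl _ this
  refine ⟨by omega, le_antisymm ?_ ?_⟩
  · have h := svals_getD_le A hbk hk
    rw [hgk] at h
    exact h
  · exact h4 _ (le_refl _) (by omega)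

lemma rkF_lt_iff (A : List Int) (i j : Nat) (hi : i < A.length) (hj : j < A.length) :
    rkF A i < rkF A j ↔ A.getD i 0 < A.getD j 0 := by
  obtain ⟨hm1, he1⟩ := rkF_spec A i hi
  obtain ⟨hm2, he2⟩ := rkF_spec A j hj
  constructor
  · intro h
    rw [← he1, ← he2]
    exact svals_getD_lt A h hm2
  · intro h
    by_contra hge
    have : (svals A).getD (rkF A j) 0 ≤ (svals A).getD (rkF A i) 0 :=
      svals_getD_le A (by omega) hm1
    rw [he1, he2] at this
    omega

-- ===== the two sweeps =====

def stepL (A B : List Int) (p : Seg × List (Option Int)) (i : Nat) : Seg × List (Option Int) :=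
  (updT p.1 0 (svals A).length (rkF A i) (B.getD i 0),
   p.2 ++ [qryT p.1 0 (svals A).length 0 (rkF A i)])

def stepR (A B : List Int) (p : Seg × List (Option Int)) (i : Nat) : Seg × List (Option Int) :=
  (updT p.1 0 (svals A).length (rkF A i) (B.getD i 0),
   qryT p.1 0 (svals A).length (rkF A i + 1) (svals A).length :: p.2)

lemma passL (A B : List Int) (hm : 0 < (svals A).length) :
    ∀ i, i ≤ A.length →
    GoodT ((List.range i).foldl (stepL A B) (buildT 0 (svals A).length, [])).1 0 (svals A).length
      (fL (rkF A) (fun j => B.getD j 0) (List.range i)) ∧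
    ((List.range i).foldl (stepL A B) (buildT 0 (svals A).length, [])).2
      = (List.range i).map (fun j => Lspec A B j) := by
  intro i
  induction i with
  | zero =>
    intro _
    exact ⟨build_good ((svals A).length) 0 _ rfl hm, rfl⟩
  | succ i ih =>
    intro hle
    have hi : i < A.length := by omega
    obtain ⟨ihg, ihl⟩ := ih (by omega)
    have hrk := rkF_spec A i hi
    rw [List.range_succ, List.foldl_append, List.foldl_cons, List.foldl_nil]
    set st := (List.range i).foldl (stepL A B) (buildT 0 (svals A).length, []) with hst
    have hfl : fL (rkF A) (fun j => B.getD j 0) (List.range i ++ [i])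
        = fupd (fL (rkF A) (fun j => B.getD j 0) (List.range i)) (rkF A i) (B.getD i 0) := by
      simp [fL, List.foldl_append]
    constructor
    · rw [hfl]
      exact upd_good st.1 _ _ _ _ _ ihg (Nat.zero_le _) hrk.1
    · show st.2 ++ [qryT st.1 0 (svals A).length 0 (rkF A i)]
        = (List.range i ++ [i]).map (fun j => Lspec A B j)
      rw [List.map_append, ihl, List.map_cons, List.map_nil]
      congr 1
      rw [qry_good st.1 0 (rkF A i) _ _ _ ihg]
      have hmin : min (svals A).length (rkF A i) = rkF A i := by omega
      have hmax : max 0 0 = 0 := rfl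
      rw [hmax, hmin, regroup]
      have hfc : (List.range i).filter (fun j => decide (0 ≤ rkF A j ∧ rkF A j < rkF A i))
          = (List.range i).filter (fun j => decide (g A j < g A i)) := by
        apply List.filter_congr
        intro j hj
        have hjn : j < A.length := by
          have := List.mem_range.mp hj
          omega
        simp only [decide_eq_decide]
        constructor
        · intro hc
          exact (rkF_lt_iff A j i hjn hi).mp hc.2
        · intro hc
          exact ⟨Nat.zero_le _, (rkF_lt_iff A j i hjn hi).mpr hc⟩
      rw [hfc, MB_eq_mfold]
      rfl

lemma passR (A B : List Int) (hm : 0 < (svals A).length) :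
    ∀ k i, i + k = A.length →
    GoodT (((List.range' i k).reverse).foldl (stepR A B) (buildT 0 (svals A).length, [])).1
      0 (svals A).length (fL (rkF A) (fun j => B.getD j 0) ((List.range' i k).reverse)) ∧
    (((List.range' i k).reverse).foldl (stepR A B) (buildT 0 (svals A).length, [])).2
      = (List.range' i k).map (fun j => Rspec A B A.length j) := by
  intro k
  induction k with
  | zero =>
    intro i _
    exact ⟨build_good ((svals A).length) 0 _ rfl hm, rfl⟩
  | succ k ih =>
    intro i hik
    have hi : i < A.length := by omega
    obtain ⟨ihg, ihl⟩ := ih (i + 1) (by omega)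
    have hrk := rkF_spec A i hi
    rw [List.range'_succ, List.reverse_cons, List.foldl_append, List.foldl_cons, List.foldl_nil]
    set st := (((List.range' (i + 1) k).reverse).foldl (stepR A B)
      (buildT 0 (svals A).length, [])) with hst
    have hfl : fL (rkF A) (fun j => B.getD j 0) ((List.range' (i + 1) k).reverse ++ [i])
        = fupd (fL (rkF A) (fun j => B.getD j 0) ((List.range' (i + 1) k).reverse))
            (rkF A i) (B.getD i 0) := by
      simp [fL, List.foldl_append]
    constructor
    · rw [hfl]
      exact upd_good st.1 _ _ _ _ _ ihg (Nat.zero_le _) hrk.1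
    · show qryT st.1 0 (svals A).length (rkF A i + 1) (svals A).length :: st.2
        = (i :: List.range' (i + 1) k).map (fun j => Rspec A B A.length j)
      rw [List.map_cons, ihl]
      congr 1
      rw [qry_good st.1 (rkF A i + 1) (svals A).length _ _ _ ihg]
      have hmax : max 0 (rkF A i + 1) = rkF A i + 1 := by omega
      have hmin : min (svals A).length (svals A).length = (svals A).length := min_self _
      rw [hmax, hmin, regroup]
      have hfc : ((List.range' (i + 1) k).reverse).filter
            (fun j => decide (rkF A i + 1 ≤ rkF A j ∧ rkF A j < (svals A).length))
          = ((List.range' (i + 1) k).reverse).filter (fun j => decide (g A i < g A j)) := by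
        apply List.filter_congr
        intro j hj
        have hjn : j < A.length := by
          have := List.mem_range'_1.mp (List.mem_reverse.mp hj)
          omega
        have hrkj := rkF_spec A j hjn
        simp only [decide_eq_decide]
        constructor
        · intro hc
          exact (rkF_lt_iff A i j hi hjn).mp (by omega)
        · intro hc
          have := (rkF_lt_iff A i j hi hjn).mpr hc
          exact ⟨by omega, hrkj.1⟩
      rw [hfc, List.filter_reverse, List.map_reverse, MB_reverse, MB_eq_mfold]
      have hk : A.length - (i + 1) = k := by omega
      unfold Rspec
      rw [hk]
      rfl

lemma solve_alt_char (A B : List Int) :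
    solve_alt A B = match combineFold A B A.length with | some v => v | none => -1 := by
  have hbody : solve_alt A B =
      (if A.length = 0 then (-1 : Int) else
        ((List.range A.length).foldl (fun best i =>
          let lo := ((List.range A.length).foldl (stepL A B)
                  (buildT 0 (svals A).length, [])).2.getD i none
          let ro := (((List.range A.length).reverse).foldl (stepR A B)
                  (buildT 0 (svals A).length, [])).2.getD i none
          if lo.isSome ∧ ro.isSome then mnB best (lo.getD 0 + ro.getD 0 + B.getD i 0)
          else best) none).getD (-1)) := rfl
  rw [hbody]
  by_cases hn : A.length = 0
  · rw [if_pos hn, hn]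
    rfl
  · rw [if_neg hn]
    have hm : 0 < (svals A).length := by
      have hmem : A.getD 0 0 ∈ svals A := (mem_svals A _).mpr (by
        rw [List.getD_eq_getElem _ _ (by omega)]
        exact List.getElem_mem (by omega))
      exact List.length_pos_of_mem hmem
    have hL := (passL A B hm A.length (le_refl _)).2
    have hR := (passR A B hm A.length 0 (by omega)).2
    have hR' : (((List.range A.length).reverse).foldl (stepR A B)
        (buildT 0 (svals A).length, [])).2
        = (List.range' 0 A.length).map (fun j => Rspec A B A.length j) := by
      rw [List.range_eq_range']
      exact hR
    have hfold : (List.range A.length).foldl (fun best i =>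
        let lo := ((List.range A.length).foldl (stepL A B)
                (buildT 0 (svals A).length, [])).2.getD i none
        let ro := (((List.range A.length).reverse).foldl (stepR A B)
                (buildT 0 (svals A).length, [])).2.getD i none
        if lo.isSome ∧ ro.isSome then mnB best (lo.getD 0 + ro.getD 0 + B.getD i 0)
        else best) none = combineFold A B A.length := by
      unfold combineFold
      apply List.foldl_ext
      intro acc i hi
      have hiLen : i < A.length := List.mem_range.mp hi
      rw [hL, hR']
      have e1 : ((List.range A.length).map (fun j => Lspec A B j)).getD i none
          = Lspec A B i := by
        rw [List.getD_eq_getElem _ _ (by simpa using hiLen), List.getElem_map,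
          List.getElem_range]
      have e2 : ((List.range' 0 A.length).map (fun j => Rspec A B A.length j)).getD i none
          = Rspec A B A.length i := by
        rw [List.getD_eq_getElem _ _ (by simpa using hiLen), List.getElem_map,
          List.getElem_range']
        simp
      rw [e1, e2]
      cases Lspec A B i <;> cases Rspec A B A.length i <;>
        simp [mnB_eq_ominA, g]
    rw [hfold]
    cases combineFold A B A.length <;> rfl

-- ===== VERDICT (by name: the statement is the Claim_ definition above) =====
theorem solve_spec : Claim_equal_solve := by
  intro A B _ _
  unfold Spec_solve
  rw [solve_char, solve_alt_char]
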